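-- pv_equiv track=rewrite | github.com/sologuboved/misc | broken.py | is_broken_bin
-- ===== SOURCE A (Python) =====
-- def is_broken_bin(s):
--     pat = '12'
--     i = False
--     for char in s:
--         if char != pat[i]:
--             return True
--         i = not i
--     return False
-- ===== SOURCE B (Python) =====
-- def is_broken_bin(s):
--     expected = ('12' * (len(s) // 2 + 1))[:len(s)]
--     return s != expected
-- ===== Notes on version B (the rewrite author's own statement) =====
-- stated objective: simpler
-- what changed: Replaces the short-circuit pairwise loop with flag state by building the full expected alternating pattern once and comparing whole strings.
import Mathlib
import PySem

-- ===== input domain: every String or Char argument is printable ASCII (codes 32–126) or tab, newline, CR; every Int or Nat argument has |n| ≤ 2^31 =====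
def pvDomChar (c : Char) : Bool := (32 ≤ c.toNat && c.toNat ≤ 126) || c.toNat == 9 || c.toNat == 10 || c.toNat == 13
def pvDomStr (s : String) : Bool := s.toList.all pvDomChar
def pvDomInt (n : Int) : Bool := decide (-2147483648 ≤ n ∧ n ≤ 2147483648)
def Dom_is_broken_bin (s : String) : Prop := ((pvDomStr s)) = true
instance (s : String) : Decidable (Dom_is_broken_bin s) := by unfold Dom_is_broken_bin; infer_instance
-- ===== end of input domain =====

-- B changes the decomposition: it builds the expected alternating '12' pattern and compares, instead of A's char-by-char loop with a flipping flag (objective: simpler).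

-- ===== PORT A =====
-- the loop over s with flag i; pat[i] indexes '12' with the bool (False→'1', True→'2')
def isBrokenLoop : List Char → Bool → Bool
  | [], _ => false
  | c :: rest, i => if c ≠ (if i then '2' else '1') then true else isBrokenLoop rest (!i)

def is_broken_bin (s : String) : Bool := isBrokenLoop s.toList false

-- ===== PORT B =====
-- expected = ('12' * (len(s)//2 + 1))[:len(s)]; return s != expected (strings compared as char lists)
def is_broken_bin_alt (s : String) : Bool :=
  let n := s.toList.length
  let expected := (List.flatten (List.replicate (n / 2 + 1) ['1', '2'])).take n
  decide (s.toList ≠ expected)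

-- ===== PRECONDITION & SPEC =====
def Spec_is_broken_bin (s : String) (out : Bool) : Prop := out = is_broken_bin_alt s
instance (s : String) (out : Bool) : Decidable (Spec_is_broken_bin s out) := by unfold Spec_is_broken_bin; infer_instance

-- ===== CLAIM (what is proved, stated in full; the proofs are below) =====
def Claim_equal_is_broken_bin : Prop := ∀ (s : String), Dom_is_broken_bin s → Spec_is_broken_bin s (is_broken_bin s)

-- ===== LEMMAS AND PROOFS =====

-- the alternating pattern of length n starting at flag i
def expAux : Bool → Nat → List Char
  | _, 0 => []
  | i, n + 1 => (if i then '2' else '1') :: expAux (!i) n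

theorem isBrokenLoop_eq_expAux (l : List Char) (i : Bool) :
    isBrokenLoop l i = decide (l ≠ expAux i l.length) := by
  induction l generalizing i with
  | nil => simp [isBrokenLoop, expAux]
  | cons c rest ih =>
    simp only [isBrokenLoop, List.length_cons, expAux, ih]
    by_cases h : c = (if i then '2' else '1') <;> simp [h]

theorem take_flatten_replicate (k n : Nat) (hn : n ≤ 2 * k) :
    (List.flatten (List.replicate k ['1', '2'])).take n = expAux false n := by
  induction k generalizing n with
  | zero => interval_cases n; simp [expAux]
  | succ k ih =>
    match n with
    | 0 => simp [expAux]
    | 1 => simp [List.replicate_succ, expAux]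
    | n + 2 =>
      have h2 : n ≤ 2 * k := by omega
      simp only [List.replicate_succ, List.flatten_cons, List.cons_append, List.take_succ_cons,
        expAux, Bool.not_false, Bool.not_true]
      simpa using ih n h2

-- ===== VERDICT (by name: the statement is the Claim_ definition above) =====
theorem is_broken_bin_spec : Claim_equal_is_broken_bin := by
  intro s _
  simp only [Spec_is_broken_bin, is_broken_bin, is_broken_bin_alt,
    isBrokenLoop_eq_expAux, take_flatten_replicate _ _ (by omega : s.toList.length ≤ 2 * (s.toList.length / 2 + 1))]
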